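-- pv_equiv track=rewrite | github.com/djaodjin/djaodjin-saas | saas/filters.py | search_terms_as_list
-- ===== SOURCE A (Python) =====
-- def search_terms_as_list(params):
--     """
--     Search terms are set by a ?q=... query parameter.
--     When multiple search terms must be matched, they can be delimited
--     by a comma.
--     """
--     params = params.replace('\x00', '')  # strip null characters
--     results = []
--     inside = False
--     first = 0
--     for last, letter in enumerate(params):
--         if inside:
--             if letter == '"':
--                 if first < last:
--                     results += [params[first:last]]
--                 first = last + 1
--                 inside = False
--         else:
--             if letter in (',',):
--                 if first < last:
--                     results += [params[first:last]]
--                 first = last + 1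
--             elif letter == '"':
--                 inside = True
--                 first = last + 1
--     if first < len(params):
--         results += [params[first:len(params)]]
--     return results
-- ===== SOURCE B (Python) =====
-- def search_terms_as_list(params):
--     """
--     Search terms are set by a ?q=... query parameter.
--     When multiple search terms must be matched, they can be delimited
--     by a comma.
--     """
--     params = params.replace('\x00', '')  # strip null characters
--     parts = params.split('"')
--     last = len(parts) - 1
--     results = []
--     for i, part in enumerate(parts):
--         if i % 2 == 1:
--             # inside-quote content (an unclosed final quote runs to the end)
--             if part:
--                 results.append(part)
--         else:
--             chunks = part.split(',')
--             if i != last: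
--                 # the chunk immediately before an opening quote is dropped
--                 chunks = chunks[:-1]
--             results.extend(c for c in chunks if c)
--     return results
-- ===== Notes on version B (the rewrite author's own statement) =====
-- stated objective: faster
-- what changed: Replaced the char-by-char index/state-machine scanner with a split-based parser: split on the double-quote character so odd-index parts are quoted terms, split even-index parts on commas (dropping the chunk before an opening quote), with no per-character Python-level state updates or slicing.
import Mathlib
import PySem

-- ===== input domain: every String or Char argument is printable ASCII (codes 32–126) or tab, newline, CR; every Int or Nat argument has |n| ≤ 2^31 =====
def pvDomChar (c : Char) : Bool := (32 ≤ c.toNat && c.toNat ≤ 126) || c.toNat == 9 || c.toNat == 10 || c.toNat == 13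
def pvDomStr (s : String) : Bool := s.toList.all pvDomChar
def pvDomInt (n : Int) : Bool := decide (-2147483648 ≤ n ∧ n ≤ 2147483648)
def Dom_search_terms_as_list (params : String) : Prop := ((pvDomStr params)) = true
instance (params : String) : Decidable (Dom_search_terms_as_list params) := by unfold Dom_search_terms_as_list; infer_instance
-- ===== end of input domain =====

-- B replaces A's char-by-char index state machine with a split-on-'"'/split-on-',' parser; same results, same side effects (none).

-- ===== PORT A =====
-- the loop body of A's 'for last, letter in enumerate(params)'
def aStep (cs : List Char) (st : List String × Bool × Int) (p : Int × Char) : List String × Bool × Int :=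
  let results := st.1
  let inside := st.2.1
  let first := st.2.2
  let last := p.1
  let letter := p.2
  if inside then
    if letter = '"' then
      ((if first < last then results ++ [String.ofList (PySem.List.slice cs (some first) (some last))] else results),
       false, last + 1)
    else (results, inside, first)
  else
    if letter = ',' then
      ((if first < last then results ++ [String.ofList (PySem.List.slice cs (some first) (some last))] else results),
       inside, last + 1)
    else if letter = '"' then (results, true, last + 1)
    else (results, inside, first)

def search_terms_as_list (params : String) : List String :=
  let cs := (PySem.Str.replace params "\x00" "").toList   -- params = params.replace('\x00', '')
  let st := (PySem.List.enumerate cs 0).foldl (aStep cs) ([], false, 0)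
  if st.2.2 < (cs.length : Int) then
    st.1 ++ [String.ofList (PySem.List.slice cs (some st.2.2) (some (cs.length : Int)))]
  else st.1

-- ===== PORT B =====
-- the loop body of B's 'for i, part in enumerate(parts)'; lastIdx = len(parts) - 1
def bStep (lastIdx : Int) (results : List String) (p : Int × List Char) : List String :=
  let i := p.1
  let part := p.2
  if PySem.Int.mod i 2 = 1 then
    if part ≠ [] then results ++ [String.ofList part] else results
  else
    let chunks := PySem.Chars.splitOn part [',']
    let chunks := if i ≠ lastIdx then PySem.List.slice chunks none (some (-1)) else chunks
    results ++ (chunks.filter (fun c => c ≠ [])).map String.ofList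

def search_terms_as_list_alt (params : String) : List String :=
  let cs := (PySem.Str.replace params "\x00" "").toList   -- params = params.replace('\x00', '')
  let parts := PySem.Chars.splitOn cs ['"']               -- parts = params.split('"')
  (PySem.List.enumerate parts 0).foldl (bStep ((parts.length : Int) - 1)) []

-- ===== PRECONDITION & SPEC =====
def Spec_search_terms_as_list (params : String) (out : List String) : Prop := out = search_terms_as_list_alt params
instance (params : String) (out : List String) : Decidable (Spec_search_terms_as_list params out) := by unfold Spec_search_terms_as_list; infer_instance

-- ===== CLAIM (what is proved, stated in full; the proofs are below) =====
def Claim_equal_search_terms_as_list : Prop := ∀ (params : String), Dom_search_terms_as_list params → Spec_search_terms_as_list params (search_terms_as_list params)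

-- ===== LEMMAS AND PROOFS =====

-- proof-side reference machine: A's scanner with an explicit chunk accumulator instead of indices
def mach : Bool → List Char → List Char → List (List Char)
  | _, [], acc => if acc = [] then [] else [acc]
  | true, x :: t, acc =>
      if x = '"' then (if acc = [] then [] else [acc]) ++ mach false t []
      else mach true t (acc ++ [x])
  | false, x :: t, acc =>
      if x = '"' then mach true t []
      else if x = ',' then (if acc = [] then [] else [acc]) ++ mach false t []
      else mach false t (acc ++ [x])

-- proof-side structural single-character split (= Python's str.split(c))
def splitCh (c : Char) : List Char → List (List Char)
  | [] => [[]]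
  | x :: t =>
      if x = c then [] :: splitCh c t
      else
        match splitCh c t with
        | [] => [[x]]
        | h :: r => (x :: h) :: r

-- proof-side reference for B's parts loop
def bList : List (List Char) → Bool → List (List Char)
  | [], _ => []
  | p :: rest, odd =>
      (if odd then (if p = [] then [] else [p])
       else ((if rest = [] then splitCh ',' p else (splitCh ',' p).dropLast).filter (fun c => c ≠ [])))
      ++ bList rest (!odd)

theorem splitCh_ne_nil (c : Char) (l : List Char) : splitCh c l ≠ [] := by
  cases l with
  | nil => simp [splitCh]
  | cons x t =>
    simp only [splitCh]
    split
    · simp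
    · cases splitCh c t <;> simp

theorem splitCh_of_not_mem (c : Char) (l : List Char) (h : c ∉ l) : splitCh c l = [l] := by
  induction l with
  | nil => rfl
  | cons x t ih =>
    simp only [List.mem_cons, not_or] at h
    have hx : ¬ x = c := fun hh => h.1 hh.symm
    simp only [splitCh, if_neg hx, ih h.2]

theorem splitCh_append_cons (c : Char) (p t : List Char) (h : c ∉ p) :
    splitCh c (p ++ c :: t) = p :: splitCh c t := by
  induction p with
  | nil => simp [splitCh]
  | cons x q ih =>
    simp only [List.mem_cons, not_or] at h
    have hx : ¬ x = c := fun hh => h.1 hh.symm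
    simp only [List.cons_append, splitCh, if_neg hx, ih h.2]

-- bridge: PySem.Chars.splitOn with a single-char separator is splitCh
theorem splitOn_go_eq (c : Char) (l : List Char) : ∀ (fuel : Nat) (cur : List Char) (acc : List (List Char)),
    l.length < fuel →
    PySem.Chars.splitOn.go [c] fuel l cur acc
      = acc.reverse ++ (match splitCh c l with
          | [] => [cur.reverse]
          | h :: r => (cur.reverse ++ h) :: r) := by
  induction l with
  | nil =>
    intro fuel cur acc hf
    cases fuel with
    | zero => omega
    | succ f => simp [PySem.Chars.splitOn.go, splitCh]
  | cons x t ih =>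
    intro fuel cur acc hf
    cases fuel with
    | zero => omega
    | succ f =>
      by_cases hx : x = c
      · subst hx
        have hpre : List.isPrefixOf [x] (x :: t) = true := by simp [List.isPrefixOf]
        simp only [PySem.Chars.splitOn.go, hpre, if_pos]
        have := ih f [] (cur.reverse :: acc) (by simpa using Nat.lt_of_succ_lt_succ hf)
        simp only [List.length_cons, List.length_nil, List.drop_succ_cons, List.drop_zero] at this ⊢
        rw [this]
        simp only [splitCh]
        cases hsp : splitCh x t with
        | nil => exact absurd hsp (splitCh_ne_nil x t)
        | cons h r => simp
      · have hpre : List.isPrefixOf [c] (x :: t) = false := by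
          simp only [List.isPrefixOf, Bool.and_eq_false_iff, beq_eq_false_iff_ne, ne_eq]
          left; exact fun h => hx h.symm
        simp only [PySem.Chars.splitOn.go, hpre]
        have := ih f (x :: cur) acc (by simpa using Nat.lt_of_succ_lt_succ hf)
        simp only [Bool.false_eq_true, if_false] at this ⊢
        rw [this]
        simp only [splitCh, if_neg hx, List.reverse_cons]
        cases hsp : splitCh c t with
        | nil => exact absurd hsp (splitCh_ne_nil c t)
        | cons h r => simp

theorem splitOn_single (c : Char) (l : List Char) :
    PySem.Chars.splitOn l [c] = splitCh c l := by
  unfold PySem.Chars.splitOn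
  rw [splitOn_go_eq c l (l.length + 1) [] [] (by omega)]
  cases hsp : splitCh c l with
  | nil => exact absurd hsp (splitCh_ne_nil c l)
  | cons h r => simp

-- every list either avoids c, or splits at the FIRST c
theorem first_occ (c : Char) (l : List Char) :
    c ∉ l ∨ ∃ p t, l = p ++ c :: t ∧ c ∉ p := by
  induction l with
  | nil => left; simp
  | cons x q ih =>
    by_cases hx : x = c
    · right; exact ⟨[], q, by simp [hx], by simp⟩
    · rcases ih with h | ⟨p, t, hpt, hp⟩
      · left; simp only [List.mem_cons, not_or]; exact ⟨fun h' => hx h'.symm, h⟩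
      · right; exact ⟨x :: p, t, by simp [hpt], by simp only [List.mem_cons, not_or]; exact ⟨fun h' => hx h'.symm, hp⟩⟩

-- ===== the A side: the index/slice fold equals mach =====

theorem take_extend (cs : List Char) (fn kn : Nat) (x : Char) (rest : List Char)
    (hfk : fn ≤ kn) (hdrop : cs.drop kn = x :: rest) :
    (cs.drop fn).take (kn + 1 - fn) = (cs.drop fn).take (kn - fn) ++ [x] := by
  have hx : cs[kn]? = some x := by
    have : (cs.drop kn)[0]? = some x := by simp [hdrop]
    simpa using this
  have h2 : (cs.drop fn)[kn - fn]? = some x := by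
    rw [List.getElem?_drop]
    rwa [Nat.add_sub_cancel' hfk]
  have : kn + 1 - fn = (kn - fn) + 1 := by omega
  rw [this, List.take_add_one, h2]
  rfl

theorem acc_ne_nil_iff (cs : List Char) (fn kn : Nat) (hk : kn ≤ cs.length) (hfk : fn ≤ kn) :
    ((cs.drop fn).take (kn - fn) ≠ []) ↔ (fn : Int) < (kn : Int) := by
  rw [← List.length_pos_iff_ne_nil]
  simp only [List.length_take, List.length_drop]
  omega

theorem foldA (cs : List Char) : ∀ (suffix : List Char) (kn fn : Nat) (res : List String) (inside : Bool),
    fn ≤ kn → cs.drop kn = suffix → kn ≤ cs.length →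
    (let st := (PySem.List.enumerate suffix (kn : Int)).foldl (aStep cs) (res, inside, (fn : Int));
     if st.2.2 < (cs.length : Int) then
       st.1 ++ [String.ofList (PySem.List.slice cs (some st.2.2) (some (cs.length : Int)))]
     else st.1)
    = res ++ (mach inside suffix ((cs.drop fn).take (kn - fn))).map String.ofList := by
  intro suffix
  induction suffix with
  | nil =>
    intro kn fn res inside hfk hdrop hk
    have hkn : kn = cs.length := by
      have := List.drop_eq_nil_iff.mp hdrop
      omega
    subst hkn
    simp only [PySem.List.enumerate, List.foldl_nil]
    have htake : (cs.drop fn).take (cs.length - fn) = cs.drop fn := by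
      apply List.take_of_length_le; simp
    rw [htake]
    by_cases hlt : (fn : Int) < (cs.length : Int)
    · have hne : cs.drop fn ≠ [] := by
        rw [← List.length_pos_iff_ne_nil, List.length_drop]; omega
      simp only [if_pos hlt]
      rw [PySem.List.slice_natCast]
      rw [List.take_of_length_le (by simp)]
      cases inside <;> simp [mach, hne]
    · have hfn : cs.length ≤ fn := by omega
      have hnil : cs.drop fn = [] := List.drop_eq_nil_iff.mpr (by omega)
      simp only [if_neg hlt, hnil]
      cases inside <;> simp [mach]
  | cons x rest ih =>
    intro kn fn res inside hfk hdrop hk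
    have hklt : kn < cs.length := by
      by_contra h
      rw [List.drop_eq_nil_iff.mpr (by omega)] at hdrop
      exact absurd hdrop (by simp)
    have hdrop' : cs.drop (kn + 1) = rest := by
      rw [← List.drop_drop, hdrop, List.drop_one, List.tail_cons]
    rw [PySem.List.enumerate_cons, List.foldl_cons]
    have hcast : ((kn : Int) + 1) = ((kn + 1 : Nat) : Int) := by push_cast; ring
    set acc := (cs.drop fn).take (kn - fn) with hacc
    have hslice : PySem.List.slice cs (some (fn : Int)) (some (kn : Int)) = acc := by
      rw [PySem.List.slice_natCast]
    have hiff := acc_ne_nil_iff cs fn kn (by omega) hfk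
    rw [← hacc] at hiff
    cases inside with
    | true =>
      by_cases hq : x = '"'
      · subst hq
        have hstep : aStep cs (res, true, (fn : Int)) ((kn : Int), '"')
            = ((if (fn : Int) < (kn : Int) then res ++ [String.ofList acc] else res), false, (kn : Int) + 1) := by
          simp [aStep, hslice]
        rw [hstep, hcast]
        rw [ih (kn + 1) (kn + 1) _ false (le_refl _) hdrop' (by omega)]
        have htake0 : (cs.drop (kn + 1)).take (kn + 1 - (kn + 1)) = [] := by simp
        rw [htake0]
        simp only [mach]
        by_cases hlt : (fn : Int) < (kn : Int)
        · have hne : acc ≠ [] := hiff.mpr hlt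
          rw [if_pos hlt, if_neg hne]
          simp
        · have he : acc = [] := by by_contra h; exact hlt (hiff.mp h)
          rw [if_neg hlt, he]
          simp
      · have hstep : aStep cs (res, true, (fn : Int)) ((kn : Int), x) = (res, true, (fn : Int)) := by
          simp [aStep, hq]
        rw [hstep, hcast]
        rw [ih (kn + 1) fn res true (by omega) hdrop' (by omega)]
        rw [take_extend cs fn kn x rest hfk hdrop, ← hacc]
        simp [mach, hq]
    | false =>
      by_cases hc : x = ','
      · subst hc
        have hstep : aStep cs (res, false, (fn : Int)) ((kn : Int), ',')
            = ((if (fn : Int) < (kn : Int) then res ++ [String.ofList acc] else res), false, (kn : Int) + 1) := by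
          simp [aStep, hslice]
        rw [hstep, hcast]
        rw [ih (kn + 1) (kn + 1) _ false (le_refl _) hdrop' (by omega)]
        have htake0 : (cs.drop (kn + 1)).take (kn + 1 - (kn + 1)) = [] := by simp
        rw [htake0]
        have hcq : (',' : Char) ≠ '"' := by decide
        simp only [mach, if_neg hcq]
        by_cases hlt : (fn : Int) < (kn : Int)
        · have hne : acc ≠ [] := hiff.mpr hlt
          rw [if_pos hlt, if_neg hne]
          simp
        · have he : acc = [] := by by_contra h; exact hlt (hiff.mp h)
          rw [if_neg hlt, he]
          simp
      · by_cases hq : x = '"'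
        · subst hq
          have hstep : aStep cs (res, false, (fn : Int)) ((kn : Int), '"') = (res, true, (kn : Int) + 1) := by
            simp [aStep]
          rw [hstep, hcast]
          rw [ih (kn + 1) (kn + 1) res true (le_refl _) hdrop' (by omega)]
          have htake0 : (cs.drop (kn + 1)).take (kn + 1 - (kn + 1)) = [] := by simp
          rw [htake0]
          simp [mach]
        · have hstep : aStep cs (res, false, (fn : Int)) ((kn : Int), x) = (res, false, (fn : Int)) := by
            simp [aStep, hc, hq]
          rw [hstep, hcast]
          rw [ih (kn + 1) fn res false (by omega) hdrop' (by omega)]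
          rw [take_extend cs fn kn x rest hfk hdrop, ← hacc]
          simp [mach, hq, hc]

-- ===== the B side: mach equals the split-based bList =====

theorem mach_outside_noquote (cs : List Char) : ∀ (acc : List Char), '"' ∉ cs → ',' ∉ acc →
    mach false cs acc = (splitCh ',' (acc ++ cs)).filter (fun c => c ≠ []) := by
  induction cs with
  | nil =>
    intro acc hq hcm
    rw [List.append_nil, splitCh_of_not_mem ',' acc hcm]
    by_cases h : acc = [] <;> simp [mach, h]
  | cons x t ih =>
    intro acc hq hcm
    simp only [List.mem_cons, not_or] at hq
    have hxq : x ≠ '"' := fun h => hq.1 h.symm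
    by_cases hc : x = ','
    · subst hc
      simp only [mach, if_neg hxq]
      rw [ih [] hq.2 (by simp)]
      have : acc ++ ',' :: t = acc ++ [','] ++ t := by simp
      rw [this]
      have h2 : acc ++ [','] ++ t = acc ++ ',' :: t := by simp
      rw [h2, splitCh_append_cons ',' acc t hcm]
      by_cases h : acc = [] <;> simp [h]
    · simp only [mach, if_neg hxq, if_neg hc]
      rw [ih (acc ++ [x]) hq.2 (by simp [hcm]; exact fun h => hc h.symm)]
      simp

theorem mach_outside_quote (cs : List Char) : ∀ (p : List Char) (t : List Char) (acc : List Char),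
    cs = p ++ '"' :: t → '"' ∉ p → ',' ∉ acc →
    mach false cs acc = ((splitCh ',' (acc ++ p)).dropLast.filter (fun c => c ≠ [])) ++ mach true t [] := by
  induction cs with
  | nil => intro p t acc h _ _; exact absurd h (by simp)
  | cons x rest ih =>
    intro p t acc hcs hqp hcm
    cases p with
    | nil =>
      simp only [List.nil_append, List.cons.injEq] at hcs
      obtain ⟨hx, ht⟩ := hcs
      subst hx; subst ht
      simp only [mach]
      rw [List.append_nil, splitCh_of_not_mem ',' acc hcm]
      simp
    | cons y q =>
      simp only [List.cons_append, List.cons.injEq] at hcs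
      obtain ⟨hx, hrest⟩ := hcs
      subst hx
      simp only [List.mem_cons, not_or] at hqp
      have hyq : ¬ x = '"' := fun h => hqp.1 h.symm
      by_cases hc : x = ','
      · subst hc
        simp only [mach, if_neg hyq]
        rw [ih q t [] hrest hqp.2 (by simp)]
        rw [splitCh_append_cons ',' acc q hcm]
        rw [List.dropLast_cons_of_ne_nil (splitCh_ne_nil ',' q)]
        by_cases h : acc = [] <;> simp [h]
      · simp only [mach, if_neg hyq, if_neg hc]
        rw [ih q t (acc ++ [x]) hrest hqp.2 (by
          simp only [List.mem_append, List.mem_singleton, not_or]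
          exact ⟨hcm, fun h => hc h.symm⟩)]
        simp

theorem mach_inside_noquote (cs : List Char) : ∀ (acc : List Char), '"' ∉ cs →
    mach true cs acc = (if acc ++ cs = [] then [] else [acc ++ cs]) := by
  induction cs with
  | nil => intro acc _; simp [mach]
  | cons x t ih =>
    intro acc hq
    simp only [List.mem_cons, not_or] at hq
    have hxq : x ≠ '"' := fun h => hq.1 h.symm
    simp only [mach, if_neg hxq]
    rw [ih (acc ++ [x]) hq.2]
    simp

theorem mach_inside_quote (p : List Char) : ∀ (t acc : List Char), '"' ∉ p →
    mach true (p ++ '"' :: t) acc = (if acc ++ p = [] then [] else [acc ++ p]) ++ mach false t [] := by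
  induction p with
  | nil => intro t acc _; simp [mach]
  | cons y q ih =>
    intro t acc hqp
    simp only [List.mem_cons, not_or] at hqp
    have hyq : ¬ y = '"' := fun h => hqp.1 h.symm
    simp only [List.cons_append, mach, if_neg hyq]
    rw [ih t (acc ++ [y]) hqp.2]
    simp

theorem mach_eq_bList : ∀ (n : Nat) (cs : List Char), cs.length ≤ n →
    (mach false cs [] = bList (splitCh '"' cs) false ∧ mach true cs [] = bList (splitCh '"' cs) true) := by
  intro n
  induction n with
  | zero =>
    intro cs h
    have : cs = [] := List.length_eq_zero_iff.mp (by omega)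
    subst this
    simp [mach, splitCh, bList]
  | succ n ih =>
    intro cs hlen
    rcases first_occ '"' cs with hno | ⟨p, t, hcs, hqp⟩
    · rw [splitCh_of_not_mem '"' cs hno]
      constructor
      · rw [mach_outside_noquote cs [] hno (by simp)]
        simp [bList]
      · rw [mach_inside_noquote cs [] hno]
        simp [bList]
    · subst hcs
      rw [splitCh_append_cons '"' p t hqp]
      have hrec := ih t (by simp at hlen; omega)
      have hrest : splitCh '"' t ≠ [] := splitCh_ne_nil '"' t
      constructor
      · rw [mach_outside_quote (p ++ '"' :: t) p t [] rfl hqp (by simp)]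
        rw [hrec.2]
        simp only [bList, if_neg hrest]
        simp
      · rw [mach_inside_quote p t [] hqp]
        rw [hrec.1]
        simp only [bList]
        simp

-- ===== the B fold equals bList =====

theorem foldB (total : Nat) : ∀ (ps : List (List Char)) (i : Nat) (res : List String),
    i + ps.length = total →
    (PySem.List.enumerate ps (i : Int)).foldl (bStep ((total : Int) - 1)) res
      = res ++ (bList ps (decide (i % 2 = 1))).map String.ofList := by
  intro ps
  induction ps with
  | nil => intro i res _; simp [PySem.List.enumerate, bList]
  | cons p rest ih =>
    intro i res hto
    rw [PySem.List.enumerate_cons, List.foldl_cons]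
    have hlen : i + (rest.length + 1) = total := by simpa using hto
    have hcast : ((i : Int) + 1) = ((i + 1 : Nat) : Int) := by push_cast; ring
    have hmod : (PySem.Int.mod (i : Int) 2 = 1) ↔ (i % 2 = 1) := by
      rw [show (2 : Int) = ((2 : Nat) : Int) from rfl, PySem.Int.mod_natCast]
      exact ⟨fun h => by exact_mod_cast h, fun h => by exact_mod_cast congrArg (Nat.cast : Nat → Int) h⟩
    have hlast : ((i : Int) ≠ (total : Int) - 1) ↔ rest ≠ [] := by
      constructor
      · intro h hr
        apply h
        rw [hr] at hlen
        simp only [List.length_nil, Nat.zero_add] at hlen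
        omega
      · intro hr h
        have h0 : rest.length = 0 := by omega
        exact hr (List.length_eq_zero_iff.mp h0)
    have hpar : (decide ((i + 1) % 2 = 1)) = !(decide (i % 2 = 1)) := by
      rcases Nat.mod_two_eq_zero_or_one i with h | h <;>
        simp [Nat.add_mod, h]
    by_cases hodd : i % 2 = 1
    · have hstep : bStep ((total : Int) - 1) res ((i : Int), p)
          = (if p ≠ [] then res ++ [String.ofList p] else res) := by
        simp only [bStep]
        rw [if_pos (hmod.mpr hodd)]
      rw [hstep, hcast, ih (i + 1) _ (by omega)]
      simp only [bList, hpar, decide_eq_true hodd]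
      by_cases hp : p = [] <;> simp [hp]
    · have hstep : bStep ((total : Int) - 1) res ((i : Int), p)
          = res ++ (((if (i : Int) ≠ (total : Int) - 1 then (PySem.Chars.splitOn p [',']).dropLast
                      else PySem.Chars.splitOn p [','])).filter (fun c => c ≠ [])).map String.ofList := by
        simp only [bStep]
        rw [if_neg (fun h => hodd (hmod.mp h)), PySem.List.slice_to_neg_one]
      rw [hstep, hcast, ih (i + 1) _ (by omega)]
      simp only [bList, hpar, decide_eq_false hodd, Bool.not_false]
      rw [splitOn_single]
      by_cases hr : rest = []
      · have hlast' : ((i : Int) = (total : Int) - 1) := by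
          by_contra hh
          exact (hlast.mp hh) hr
        rw [if_neg (fun hh => hh hlast'), if_pos hr]
        simp
      · rw [if_pos (hlast.mpr hr), if_neg hr]
        simp

-- ===== VERDICT (by name: the statement is the Claim_ definition above) =====
theorem search_terms_as_list_spec : Claim_equal_search_terms_as_list := by
  intro params _
  unfold Spec_search_terms_as_list search_terms_as_list search_terms_as_list_alt
  set cs := (PySem.Str.replace params "\x00" "").toList with hcs
  have hA := foldA cs cs 0 0 [] false (le_refl 0) (by simp) (by simp)
  simp only [Nat.cast_zero] at hA
  simp only [List.drop_zero, List.take_zero, Nat.zero_sub] at hA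
  have hB := foldB (PySem.Chars.splitOn cs ['"']).length (PySem.Chars.splitOn cs ['"']) 0 [] (by simp)
  simp only [Nat.cast_zero] at hB
  rw [hA, hB]
  rw [splitOn_single]
  rw [(mach_eq_bList cs.length cs (le_refl _)).1]
  simp
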